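-- pv_equiv track=rewrite | github.com/pypi-data/pypi-mirror-157 | packages/thanhtungthaiatmethod/thanhtungthaiatmethod-2.1.0.tar.gz/thanhtungthaiatmethod-2.1.0/src/thanhtungthaiatmethod/methods.py | Gom
-- ===== SOURCE A (Python) =====
-- def Gom(ansao, sttcung):
--     a = []
--     t = 0
--     for i in range(len(ansao)):
--         if ansao[i] == sttcung:
--             a.append(i)
--         else:
--             a.append(99)
--     for i in range(len(ansao)+2):
--         for j in range(len(ansao)-1):
--             if a[j] > a[j+1]:
--                 t = a[j+1]
--                 a[j+1] = a[j]
--                 a[j] = t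
--     return a
-- ===== SOURCE B (Python) =====
-- def Gom(ansao, sttcung):
--     matches = [i for i in range(len(ansao)) if ansao[i] == sttcung]
--     return sorted(matches + [99] * (len(ansao) - len(matches)))
-- ===== Notes on version B (the rewrite author's own statement) =====
-- stated objective: faster
-- what changed: B builds the list of matching indices with one comprehension, appends the right number of 99-pads, and applies one library sort, replacing A's interleaved build loop followed by a hand-written (n+2)-pass bubble sort.
import Mathlib
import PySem

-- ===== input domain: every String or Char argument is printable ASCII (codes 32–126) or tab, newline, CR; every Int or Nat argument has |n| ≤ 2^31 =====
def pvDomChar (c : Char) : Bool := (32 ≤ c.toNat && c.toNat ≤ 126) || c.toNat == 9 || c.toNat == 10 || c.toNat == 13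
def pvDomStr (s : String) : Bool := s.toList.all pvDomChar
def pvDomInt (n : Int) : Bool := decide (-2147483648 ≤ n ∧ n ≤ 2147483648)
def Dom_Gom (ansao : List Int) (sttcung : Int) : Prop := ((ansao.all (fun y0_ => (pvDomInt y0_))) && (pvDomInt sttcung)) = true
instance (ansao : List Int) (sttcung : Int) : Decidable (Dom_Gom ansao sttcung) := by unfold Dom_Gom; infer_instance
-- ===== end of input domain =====

-- B replaces A's interleaved build loop + hand-written (n+2)-pass bubble sort by a
-- comprehension collecting the matching indices, a 99-padding block, and one library sort.

-- ===== PORT A =====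
-- one inner-loop step: compare a[j] with a[j+1] and swap if out of order
-- (indices j, j+1 are always in range when j < a.length - 1, so getD/set are exact here)
def GomStep (a : List Int) (j : Nat) : List Int :=
  if a.getD j 0 > a.getD (j+1) 0 then
    -- t = a[j+1]; a[j+1] = a[j]; a[j] = t
    ((a.set (j+1) (a.getD j 0)).set j (a.getD (j+1) 0))
  else a

def Gom (ansao : List Int) (sttcung : Int) : List Int :=
  -- first loop: build a by appending i or 99 (ansao[i] is always in range, getD exact)
  let a := (List.range ansao.length).foldl
    (fun acc i => acc ++ [if ansao.getD i 0 = sttcung then (i : Int) else 99]) []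
  -- bubble sort: for i in range(len(ansao)+2): for j in range(len(ansao)-1): swap step
  (List.range (ansao.length + 2)).foldl
    (fun a _ => (List.range (ansao.length - 1)).foldl GomStep a) a

-- ===== PORT B =====
def Gom_alt (ansao : List Int) (sttcung : Int) : List Int :=
  let hits := ((List.range ansao.length).filter
      (fun i => ansao.getD i 0 = sttcung)).map (fun i => Int.ofNat i)
  PySem.List.sorted (hits ++ List.replicate (ansao.length - hits.length) 99)
    (fun x => x) false

-- ===== PRECONDITION & SPEC =====
def Spec_Gom (ansao : List Int) (sttcung : Int) (out : List Int) : Prop := out = Gom_alt ansao sttcung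
instance (ansao : List Int) (sttcung : Int) (out : List Int) : Decidable (Spec_Gom ansao sttcung out) := by unfold Spec_Gom; infer_instance

-- ===== CLAIM (what is proved, stated in full; the proofs are below) =====
def Claim_equal_Gom : Prop := ∀ (ansao : List Int) (sttcung : Int), Dom_Gom ansao sttcung → Spec_Gom ansao sttcung (Gom ansao sttcung)

-- ===== LEMMAS AND PROOFS =====

-- the recursive form of one bubble pass
def bp : List Int → List Int
  | [] => []
  | [x] => [x]
  | x :: y :: t => if x > y then y :: bp (x :: t) else x :: bp (y :: t)

-- a step at index j+1 leaves the head alone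
theorem gomStep_succ (h : Int) (s : List Int) (j : Nat) :
    GomStep (h :: s) (j + 1) = h :: GomStep s j := by
  simp only [GomStep, List.getD_cons_succ, List.set_cons_succ]
  split <;> rfl

theorem foldl_gomStep_map_succ (js : List Nat) (h : Int) (s : List Int) :
    js.foldl (fun a j => GomStep a (j + 1)) (h :: s) = h :: js.foldl GomStep s := by
  induction js generalizing s with
  | nil => rfl
  | cons j js ih => simp [List.foldl_cons, gomStep_succ, ih]

-- the index-loop pass equals the recursive pass
theorem pass_eq_bp (a : List Int) :
    (List.range (a.length - 1)).foldl GomStep a = bp a := by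
  induction a using bp.induct with
  | case1 => simp [bp]
  | case2 x => simp [bp]
  | case3 x y t hxy ih =>
      have hstep : GomStep (x :: y :: t) 0 = y :: x :: t := by
        simp [GomStep, hxy]
      have hlen : (x :: y :: t).length - 1 = t.length + 1 := by simp
      rw [hlen, List.range_succ_eq_map, List.foldl_cons, hstep, List.foldl_map]
      have hshift := foldl_gomStep_map_succ (List.range t.length) y (x :: t)
      simp only [Nat.succ_eq_add_one] at hshift ⊢
      rw [hshift]
      have hl : (x :: t).length - 1 = t.length := by simp
      rw [← hl, ih]
      simp [bp, hxy]
  | case4 x y t hxy ih =>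
      have hstep : GomStep (x :: y :: t) 0 = x :: y :: t := by
        simp [GomStep]; omega
      have hlen : (x :: y :: t).length - 1 = t.length + 1 := by simp
      rw [hlen, List.range_succ_eq_map, List.foldl_cons, hstep, List.foldl_map]
      have hshift := foldl_gomStep_map_succ (List.range t.length) x (y :: t)
      simp only [Nat.succ_eq_add_one] at hshift ⊢
      rw [hshift]
      have hl : (y :: t).length - 1 = t.length := by simp
      rw [← hl, ih]
      simp [bp, hxy]

theorem bp_perm (a : List Int) : List.Perm (bp a) a := by
  induction a using bp.induct with
  | case1 => simp [bp]
  | case2 x => simp [bp]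
  | case3 x y t hxy ih =>
      simp only [bp, if_pos hxy]
      exact (ih.cons y).trans (List.Perm.swap x y t)
  | case4 x y t hxy ih =>
      simp only [bp, if_neg hxy]
      exact ih.cons x

theorem bp_length (a : List Int) : (bp a).length = a.length :=
  (bp_perm a).length_eq

-- one pass pushes a maximum to the end
theorem bp_last_max (x : Int) (t : List Int) :
    ∃ w m, bp (x :: t) = w ++ [m] ∧ ∀ a ∈ x :: t, a ≤ m := by
  induction t generalizing x with
  | nil => exact ⟨[], x, by simp [bp], by simp⟩
  | cons y t ih =>
      by_cases hxy : x > y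
      · obtain ⟨w, m, hw, hm⟩ := ih x
        refine ⟨y :: w, m, by simp [bp, hxy, hw], ?_⟩
        intro a ha
        simp only [List.mem_cons] at ha
        rcases ha with rfl | rfl | ha
        · exact hm a (by simp)
        · exact le_trans (le_of_lt hxy) (hm x (by simp))
        · exact hm a (by simp [ha])
      · obtain ⟨w, m, hw, hm⟩ := ih y
        refine ⟨x :: w, m, by simp [bp, hxy, hw], ?_⟩
        intro a ha
        simp only [List.mem_cons] at ha
        rcases ha with rfl | rfl | ha
        · exact le_trans (not_lt.mp hxy) (hm y (by simp))
        · exact hm a (by simp)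
        · exact hm a (by simp [ha])

theorem bp_append_max (w : List Int) (m : Int) (h : ∀ a ∈ w, a ≤ m) :
    bp (w ++ [m]) = bp w ++ [m] := by
  induction w using bp.induct with
  | case1 => simp [bp]
  | case2 x =>
      have : ¬ x > m := not_lt.mpr (h x (by simp))
      simp [bp, this]
  | case3 x y t hxy ih =>
      have h' : ∀ a ∈ x :: t, a ≤ m := by
        intro a ha; apply h; simp only [List.mem_cons] at ha ⊢; tauto
      have ih' := ih h'
      simp only [List.cons_append] at ih'
      simp [bp, hxy, ih']
  | case4 x y t hxy ih =>
      have h' : ∀ a ∈ y :: t, a ≤ m := by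
        intro a ha; apply h; simp only [List.mem_cons] at ha ⊢; tauto
      have ih' := ih h'
      simp only [List.cons_append] at ih'
      simp [bp, hxy, ih']

theorem bp_iter_append_max (k : Nat) (w : List Int) (m : Int) (h : ∀ a ∈ w, a ≤ m) :
    bp^[k] (w ++ [m]) = bp^[k] w ++ [m] := by
  induction k generalizing w with
  | zero => rfl
  | succ k ih =>
      rw [Function.iterate_succ_apply, Function.iterate_succ_apply,
        bp_append_max w m h, ih (bp w) (fun a ha => h a ((bp_perm w).mem_iff.mp ha))]

theorem bp_iter_perm (k : Nat) (a : List Int) : List.Perm (bp^[k] a) a := by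
  induction k generalizing a with
  | zero => exact List.Perm.refl a
  | succ k ih =>
      rw [Function.iterate_succ_apply]
      exact (ih (bp a)).trans (bp_perm a)

theorem bp_iter_sorted (k : Nat) (a : List Int) (h : a.length ≤ k + 1) :
    (bp^[k] a).Pairwise (· ≤ ·) := by
  induction k generalizing a with
  | zero =>
      match a, h with
      | [], _ => simp
      | [x], _ => simp
  | succ k ih =>
      cases a with
      | nil =>
          rw [Function.iterate_succ_apply, show bp [] = [] from by simp [bp]]
          exact ih [] (by simp)
      | cons x t =>
          obtain ⟨w, m, hw, hm⟩ := bp_last_max x t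
          rw [Function.iterate_succ_apply, hw]
          have hwmem : ∀ a ∈ w, a ≤ m := by
            intro a ha
            exact hm a ((bp_perm (x :: t)).mem_iff.mp (by simp [hw, ha]))
          rw [bp_iter_append_max k w m hwmem]
          have hwlen : w.length ≤ k + 1 := by
            have hb := bp_length (x :: t)
            rw [hw] at hb; simp at hb h; omega
          refine List.pairwise_append.mpr ⟨ih w hwlen, by simp, ?_⟩
          intro a ha b hb
          simp only [List.mem_singleton] at hb; subst hb
          exact hwmem a ((bp_iter_perm k w).mem_iff.mp ha)

-- the constant-body outer fold is iteration
theorem foldl_const_iterate {α β : Type} (f : α → α) (l : List β) (a : α) :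
    l.foldl (fun a _ => f a) a = f^[l.length] a := by
  induction l generalizing a with
  | nil => rfl
  | cons b l ih => simp [List.foldl_cons, ih, Function.iterate_succ_apply]

-- the append-build loop is a map
theorem foldl_build_map (f : Nat → Int) (l : List Nat) (acc : List Int) :
    l.foldl (fun acc i => acc ++ [f i]) acc = acc ++ l.map f := by
  induction l generalizing acc with
  | nil => simp
  | cons i l ih => simp [List.foldl_cons, ih]

theorem Gom_spec_aux (ansao : List Int) (sttcung : Int) :
    Gom ansao sttcung = Gom_alt ansao sttcung := by
  show (List.range (ansao.length + 2)).foldl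
      (fun a _ => (List.range (ansao.length - 1)).foldl GomStep a)
      ((List.range ansao.length).foldl
        (fun acc i => acc ++ [if ansao.getD i 0 = sttcung then (i : Int) else 99]) [])
    = PySem.List.sorted
        ((((List.range ansao.length).filter (fun i => ansao.getD i 0 = sttcung)).map
            (fun i => Int.ofNat i))
          ++ List.replicate (ansao.length
              - (((List.range ansao.length).filter (fun i => ansao.getD i 0 = sttcung)).map
                  (fun i => Int.ofNat i)).length) 99)
        (fun x => x) false
  set n := ansao.length with hn
  set f : Nat → Int := fun i => if ansao.getD i 0 = sttcung then (i : Int) else 99 with hf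
  set p : Nat → Bool := fun i => decide (ansao.getD i 0 = sttcung) with hp
  have hbuild : (List.range n).foldl (fun acc i => acc ++ [f i]) [] = (List.range n).map f :=
    by simpa using foldl_build_map f (List.range n) []
  rw [hbuild]
  have hinitlen : ((List.range n).map f).length = n := by simp
  -- the bubble loops compute bp^[n+2] init
  have houter : (List.range (n + 2)).foldl
      (fun a _ => (List.range (n - 1)).foldl GomStep a) ((List.range n).map f)
      = bp^[n+2] ((List.range n).map f) := by
    rw [foldl_const_iterate (fun a => (List.range (n - 1)).foldl GomStep a)
      (List.range (n+2)) ((List.range n).map f)]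
    simp only [List.length_range]
    -- each pass: the fixed range n-1 equals the current length - 1 (bp preserves length)
    have key : ∀ k (a : List Int), a.length = n →
        (fun a => (List.range (n - 1)).foldl GomStep a)^[k] a = bp^[k] a := by
      intro k
      induction k with
      | zero => intro a _; rfl
      | succ k ih =>
          intro a ha
          rw [Function.iterate_succ_apply, Function.iterate_succ_apply]
          have h1 : (List.range (n - 1)).foldl GomStep a = bp a := by
            rw [← ha]; exact pass_eq_bp a
          simp only [h1]
          exact ih (bp a) (by rw [bp_length, ha])
    exact key (n+2) ((List.range n).map f) hinitlen
  rw [houter]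
  -- name the sorted order: bp^[n+2] init is a ≤-ordered rearrangement of hits ++ pad
  set hits := ((List.range n).filter p).map (fun i => Int.ofNat i) with hhits
  have hperm : List.Perm ((List.range n).map f)
      (hits ++ List.replicate (n - hits.length) 99) := by
    have hsplit : List.Perm ((List.range n).filter p ++ (List.range n).filter (fun i => !p i))
        (List.range n) := List.filter_append_perm p (List.range n)
    have h1 : List.Perm ((List.range n).map f) (((List.range n).filter p).map f
        ++ ((List.range n).filter (fun i => !p i)).map f) := by
      rw [← List.map_append]
      exact (hsplit.map f).symm
    have h2 : ((List.range n).filter p).map f = hits := by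
      rw [hhits]
      refine List.map_congr_left ?_
      intro i hi
      have hpi := (List.mem_filter.mp hi).2
      simp only [hp, decide_eq_true_eq] at hpi
      simp only [hf, if_pos hpi, Int.ofNat_eq_natCast]
    have h3 : ((List.range n).filter (fun i => !p i)).map f
        = List.replicate (n - hits.length) 99 := by
      refine List.eq_replicate_iff.mpr ⟨?_, ?_⟩
      · have hlen : ((List.range n).filter p).length
            + ((List.range n).filter (fun i => !p i)).length = n := by
          simpa using hsplit.length_eq
        have hml : hits.length = ((List.range n).filter p).length := by simp [hhits]
        simp only [List.length_map]
        omega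
      · intro b hb
        obtain ⟨i, hi, hbi⟩ := List.mem_map.mp hb
        have hpi := (List.mem_filter.mp hi).2
        simp only [hp, Bool.not_eq_eq_eq_not, Bool.not_true, decide_eq_false_iff_not] at hpi
        simp only [hf] at hbi
        rw [if_neg hpi] at hbi
        omega
    rw [h2, h3] at h1
    exact h1
  have hperm2 : List.Perm (bp^[n+2] ((List.range n).map f))
      (hits ++ List.replicate (n - hits.length) 99) :=
    (bp_iter_perm (n+2) ((List.range n).map f)).trans hperm
  have hsorted : (bp^[n+2] ((List.range n).map f)).Pairwise (· ≤ ·) :=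
    bp_iter_sorted (n+2) ((List.range n).map f) (by omega)
  exact (PySem.List.sorted_id_eq_of_perm_of_pairwise _ _ hperm2 hsorted).symm

-- ===== VERDICT (by name: the statement is the Claim_ definition above) =====
theorem Gom_spec : Claim_equal_Gom := by
  intro ansao sttcung _
  exact Gom_spec_aux ansao sttcung
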